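-- pv_equiv track=rewrite | github.com/vishalmishra27/BSS-Tool | inspiration flask-api/engines/QualityComparison.py | _find_control_raw_rows
-- ===== SOURCE A (Python) =====
-- from typing import Any, Dict, List, Optional, Tuple
--
-- def _find_control_raw_rows(
--     control_id: str,
--     raw_sheets: Dict[str, List[List[str]]],
-- ) -> Tuple[Optional[List[List[str]]], Optional[str]]:
--     """Find the raw rows for a control ID across workbook sheets.
--
--     Returns (rows, sheet_name) or (None, None).
--     The first sheet is treated as the summary and skipped for per-control matching.
--     """
--     sheet_names = list(raw_sheets.keys())
--     cid_upper = control_id.strip().upper()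
--     control_sheets = sheet_names[1:] if len(sheet_names) > 1 else sheet_names
--
--     # Pass 1: exact sheet name match
--     for name in control_sheets:
--         if name.strip().upper() == cid_upper:
--             return raw_sheets[name], name
--
--     # Pass 2: sheet name contains the control ID
--     for name in control_sheets:
--         if cid_upper in name.strip().upper():
--             return raw_sheets[name], name
--
--     # Pass 3: control ID appears in first 5 rows of sheet
--     for name in control_sheets:
--         for row in raw_sheets[name][:5]:
--             if any(cid_upper in str(cell).upper() for cell in row):
--                 return raw_sheets[name], name
--
--     return None, None
-- ===== SOURCE B (Python) =====
-- def _find_control_raw_rows(control_id, raw_sheets):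
--     """Single pass over the sheets: give each sheet a priority score
--     (1 exact name match, 2 name contains the id, 3 id appears in the
--     first 5 rows) and keep the best (lowest score, earliest sheet)."""
--     sheet_names = list(raw_sheets.keys())
--     cid = control_id.strip().upper()
--     control_sheets = sheet_names[1:] if len(sheet_names) > 1 else sheet_names
--     best = None  # (score, name)
--     for name in control_sheets:
--         norm = name.strip().upper()
--         if norm == cid:
--             score = 1
--         elif cid in norm:
--             score = 2
--         elif any(cid in str(cell).upper() for row in raw_sheets[name][:5] for cell in row):
--             score = 3
--         else:
--             continue
--         if best is None or score < best[0]: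
--             best = (score, name)
--     if best is None:
--         return None, None
--     return raw_sheets[best[1]], best[1]
-- ===== Notes on version B (the rewrite author's own statement) =====
-- stated objective: alternative
-- what changed: Replaces A's three sequential scans over the sheet list by a single scan that scores each sheet (1 exact, 2 name-contains, 3 content-contains) and keeps the minimum score with earliest-sheet tie-breaking.
import Mathlib
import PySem

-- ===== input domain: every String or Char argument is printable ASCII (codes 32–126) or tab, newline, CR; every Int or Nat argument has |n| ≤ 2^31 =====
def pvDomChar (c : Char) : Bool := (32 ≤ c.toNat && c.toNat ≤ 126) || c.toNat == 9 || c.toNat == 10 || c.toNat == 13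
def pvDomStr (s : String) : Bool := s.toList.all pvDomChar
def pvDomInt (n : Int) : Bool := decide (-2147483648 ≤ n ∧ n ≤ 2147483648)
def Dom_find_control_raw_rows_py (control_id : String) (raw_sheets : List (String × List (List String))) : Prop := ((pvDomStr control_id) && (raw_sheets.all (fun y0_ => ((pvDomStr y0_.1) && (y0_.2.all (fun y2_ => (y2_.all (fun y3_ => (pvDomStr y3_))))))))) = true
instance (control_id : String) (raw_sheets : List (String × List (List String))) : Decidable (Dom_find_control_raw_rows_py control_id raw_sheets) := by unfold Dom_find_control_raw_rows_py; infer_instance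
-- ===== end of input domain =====

-- B replaces A's three sequential scans by one scoring scan keeping the minimum (lowest score, earliest sheet); same results, different decomposition.


-- ===== PORT A =====
-- name.strip().upper()
def pvNorm (s : String) : String := PySem.Str.upper (PySem.Str.strip s)

-- any(cid_upper in str(cell).upper() for cell in row) over rows[:5]  (cells are already str)
def pvContent (cid : String) (rows : List (List String)) : Bool :=
  (PySem.List.slice rows none (some 5)).any
    (fun row => row.any (fun cell => PySem.Str.isIn cid (PySem.Str.upper cell)))

-- Pass 1: exact sheet name match
def pvPass1 (cid : String) : List String → Option String
  | [] => none
  | n :: t => if pvNorm n == cid then some n else pvPass1 cid t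

-- Pass 2: sheet name contains the control ID
def pvPass2 (cid : String) : List String → Option String
  | [] => none
  | n :: t => if PySem.Str.isIn cid (pvNorm n) then some n else pvPass2 cid t

-- Pass 3: control ID appears in first 5 rows of sheet
def pvPass3 (cid : String) (d : PySem.Dict String (List (List String))) : List String → Option String
  | [] => none
  | n :: t => if pvContent cid (d.getD n []) then some n else pvPass3 cid d t

def find_control_raw_rows_py (control_id : String) (raw_sheets : List (String × List (List String))) : Option (List (List String)) × Option String :=
  let d := PySem.Dict.ofList raw_sheets
  let sheet_names := d.keys
  let cid := pvNorm control_id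
  let control_sheets := if sheet_names.length > 1 then sheet_names.drop 1 else sheet_names
  match pvPass1 cid control_sheets with
  | some name => (d.get? name, some name)
  | none =>
    match pvPass2 cid control_sheets with
    | some name => (d.get? name, some name)
    | none =>
      match pvPass3 cid d control_sheets with
      | some name => (d.get? name, some name)
      | none => (none, none)

-- ===== PORT B =====
-- priority score of a sheet: 1 exact, 2 name-contains, 3 content-contains, none otherwise
def pvScore (cid : String) (d : PySem.Dict String (List (List String))) (name : String) : Option Nat :=
  if pvNorm name == cid then some 1
  else if PySem.Str.isIn cid (pvNorm name) then some 2
  else if pvContent cid (d.getD name []) then some 3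
  else none

-- loop body: update best when the new score is strictly smaller
def pvStep (cid : String) (d : PySem.Dict String (List (List String)))
    (best : Option (Nat × String)) (name : String) : Option (Nat × String) :=
  match pvScore cid d name with
  | none => best
  | some k =>
    match best with
    | none => some (k, name)
    | some (bk, _) => if k < bk then some (k, name) else best

def find_control_raw_rows_py_alt (control_id : String) (raw_sheets : List (String × List (List String))) : Option (List (List String)) × Option String :=
  let d := PySem.Dict.ofList raw_sheets
  let sheet_names := d.keys
  let cid := pvNorm control_id
  let control_sheets := if sheet_names.length > 1 then sheet_names.drop 1 else sheet_names
  match control_sheets.foldl (pvStep cid d) none with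
  | none => (none, none)
  | some (_, n) => (d.get? n, some n)

-- ===== PRECONDITION & SPEC =====
def Spec_find_control_raw_rows_py (control_id : String) (raw_sheets : List (String × List (List String))) (out : Option (List (List String)) × Option String) : Prop := out = find_control_raw_rows_py_alt control_id raw_sheets
instance (control_id : String) (raw_sheets : List (String × List (List String))) (out : Option (List (List String)) × Option String) : Decidable (Spec_find_control_raw_rows_py control_id raw_sheets out) := by unfold Spec_find_control_raw_rows_py; infer_instance

-- ===== CLAIM (what is proved, stated in full; the proofs are below) =====
def Claim_equal_find_control_raw_rows_py : Prop := ∀ (control_id : String) (raw_sheets : List (String × List (List String))), Dom_find_control_raw_rows_py control_id raw_sheets → Spec_find_control_raw_rows_py control_id raw_sheets (find_control_raw_rows_py control_id raw_sheets)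

-- ===== LEMMAS AND PROOFS =====

-- keep the left (earlier) candidate unless the right one has a strictly smaller score
def pvCombine : Option (Nat × String) → Option (Nat × String) → Option (Nat × String)
  | none, b => b
  | some a, none => some a
  | some a, some b => if b.1 < a.1 then some b else some a

lemma pvCombine_none_left (b : Option (Nat × String)) : pvCombine none b = b := by
  cases b <;> rfl

lemma pvCombine_none_right (a : Option (Nat × String)) : pvCombine a none = a := by
  cases a <;> rfl

lemma pvCombine_some_some (a b : Nat × String) :
    pvCombine (some a) (some b) = if b.1 < a.1 then some b else some a := rfl

lemma pvStep_eq_combine (cid : String) (d : PySem.Dict String (List (List String)))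
    (best : Option (Nat × String)) (name : String) :
    pvStep cid d best name =
      pvCombine best ((pvScore cid d name).map (fun k => (k, name))) := by
  unfold pvStep pvCombine
  cases pvScore cid d name <;> cases best <;> simp

lemma pvCombine_assoc (a b c : Option (Nat × String)) :
    pvCombine (pvCombine a b) c = pvCombine a (pvCombine b c) := by
  cases a with
  | none => simp [pvCombine_none_left]
  | some a =>
    cases b with
    | none => simp [pvCombine_none_left, pvCombine_none_right]
    | some b =>
      cases c with
      | none => simp [pvCombine_none_right]
      | some c =>
        by_cases h1 : b.1 < a.1 <;> by_cases h2 : c.1 < b.1 <;> by_cases h3 : c.1 < a.1 <;>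
          simp [pvCombine_some_some, h1, h2, h3] <;> omega

lemma pvFoldl_absorb (cid : String) (d : PySem.Dict String (List (List String)))
    (l : List String) (acc : Option (Nat × String)) :
    l.foldl (pvStep cid d) acc = pvCombine acc (l.foldl (pvStep cid d) none) := by
  induction l generalizing acc with
  | nil => simp [pvCombine_none_right]
  | cons n t ih =>
    simp only [List.foldl_cons]
    rw [ih, ih (pvStep cid d none n), pvStep_eq_combine, pvStep_eq_combine,
      pvCombine_assoc, pvCombine_none_left]

-- A's three passes assembled into (score, name) form
def pvChain (cid : String) (d : PySem.Dict String (List (List String))) (l : List String) : Option (Nat × String) :=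
  match pvPass1 cid l with
  | some n => some (1, n)
  | none =>
    match pvPass2 cid l with
    | some n => some (2, n)
    | none => (pvPass3 cid d l).map (fun n => (3, n))

lemma pvChain_eq_one (cid : String) (d : PySem.Dict String (List (List String)))
    (l : List String) (n : String) (h : pvPass1 cid l = some n) :
    pvChain cid d l = some (1, n) := by unfold pvChain; rw [h]

lemma pvChain_eq_two (cid : String) (d : PySem.Dict String (List (List String)))
    (l : List String) (n : String) (h1 : pvPass1 cid l = none) (h2 : pvPass2 cid l = some n) :
    pvChain cid d l = some (2, n) := by unfold pvChain; rw [h1, h2]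

lemma pvChain_eq_three (cid : String) (d : PySem.Dict String (List (List String)))
    (l : List String) (h1 : pvPass1 cid l = none) (h2 : pvPass2 cid l = none) :
    pvChain cid d l = (pvPass3 cid d l).map (fun n => (3, n)) := by
  unfold pvChain; rw [h1, h2]

lemma pvChain_score_pos (cid : String) (d : PySem.Dict String (List (List String)))
    (l : List String) (k : Nat) (m : String) (h : pvChain cid d l = some (k, m)) :
    1 ≤ k := by
  unfold pvChain at h
  cases h1 : pvPass1 cid l <;> rw [h1] at h
  · cases h2 : pvPass2 cid l <;> rw [h2] at h
    · cases h3 : pvPass3 cid d l <;> rw [h3] at h <;> simp_all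
      omega
    · simp_all
      omega
  · simp_all

lemma pvChain_cons (cid : String) (d : PySem.Dict String (List (List String)))
    (n : String) (t : List String) :
    pvChain cid d (n :: t) =
      pvCombine ((pvScore cid d n).map (fun k => (k, n))) (pvChain cid d t) := by
  by_cases h1 : (pvNorm n == cid) = true
  · have hs : pvScore cid d n = some 1 := by unfold pvScore; rw [if_pos h1]
    have hp : pvPass1 cid (n :: t) = some n := by unfold pvPass1; rw [if_pos h1]
    rw [hs, pvChain_eq_one cid d (n :: t) n hp]
    cases hc : pvChain cid d t with
    | none => simp [pvCombine_none_right]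
    | some p =>
      obtain ⟨k, m⟩ := p
      have hk := pvChain_score_pos cid d t k m hc
      simp only [Option.map_some, pvCombine_some_some]
      rw [if_neg (by omega)]
  · have hp1 : pvPass1 cid (n :: t) = pvPass1 cid t := by simp only [pvPass1]; rw [if_neg h1]
    by_cases h2 : PySem.Str.isIn cid (pvNorm n) = true
    · have hs : pvScore cid d n = some 2 := by unfold pvScore; rw [if_neg h1, if_pos h2]
      have hp2 : pvPass2 cid (n :: t) = some n := by unfold pvPass2; rw [if_pos h2]
      rw [hs]
      cases hq1 : pvPass1 cid t with
      | some m =>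
        rw [pvChain_eq_one cid d (n :: t) m (hp1.trans hq1), pvChain_eq_one cid d t m hq1]
        simp [pvCombine_some_some]
      | none =>
        rw [pvChain_eq_two cid d (n :: t) n (hp1.trans hq1) hp2]
        cases hq2 : pvPass2 cid t with
        | some m =>
          rw [pvChain_eq_two cid d t m hq1 hq2]
          simp [pvCombine_some_some]
        | none =>
          rw [pvChain_eq_three cid d t hq1 hq2]
          cases hq3 : pvPass3 cid d t <;>
            simp [pvCombine_some_some, pvCombine_none_right]
    · have hp2 : pvPass2 cid (n :: t) = pvPass2 cid t := by simp only [pvPass2]; rw [if_neg h2]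
      by_cases h3 : pvContent cid (d.getD n []) = true
      · have hs : pvScore cid d n = some 3 := by
          unfold pvScore; rw [if_neg h1, if_neg h2, if_pos h3]
        have hp3 : pvPass3 cid d (n :: t) = some n := by unfold pvPass3; rw [if_pos h3]
        rw [hs]
        cases hq1 : pvPass1 cid t with
        | some m =>
          rw [pvChain_eq_one cid d (n :: t) m (hp1.trans hq1), pvChain_eq_one cid d t m hq1]
          simp [pvCombine_some_some]
        | none =>
          cases hq2 : pvPass2 cid t with
          | some m =>
            rw [pvChain_eq_two cid d (n :: t) m (hp1.trans hq1) (hp2.trans hq2),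
              pvChain_eq_two cid d t m hq1 hq2]
            simp [pvCombine_some_some]
          | none =>
            rw [pvChain_eq_three cid d (n :: t) (hp1.trans hq1) (hp2.trans hq2),
              pvChain_eq_three cid d t hq1 hq2, hp3]
            cases hq3 : pvPass3 cid d t <;>
              simp [pvCombine_some_some, pvCombine_none_right]
      · have hs : pvScore cid d n = none := by
          unfold pvScore; rw [if_neg h1, if_neg h2, if_neg h3]
        have hp3 : pvPass3 cid d (n :: t) = pvPass3 cid d t := by
          simp only [pvPass3]; rw [if_neg h3]
        have : pvChain cid d (n :: t) = pvChain cid d t := by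
          unfold pvChain; rw [hp1, hp2, hp3]
        rw [hs, this]
        simp [pvCombine_none_left]

lemma pvFoldl_eq_chain (cid : String) (d : PySem.Dict String (List (List String)))
    (l : List String) :
    l.foldl (pvStep cid d) none = pvChain cid d l := by
  induction l with
  | nil => rfl
  | cons n t ih =>
    simp only [List.foldl_cons]
    rw [pvFoldl_absorb, ih, pvStep_eq_combine, pvCombine_none_left, pvChain_cons]

-- ===== VERDICT (by name: the statement is the Claim_ definition above) =====
theorem find_control_raw_rows_py_spec : Claim_equal_find_control_raw_rows_py := by
  intro control_id raw_sheets _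
  unfold Spec_find_control_raw_rows_py
  show find_control_raw_rows_py control_id raw_sheets = _
  simp only [find_control_raw_rows_py, find_control_raw_rows_py_alt]
  rw [pvFoldl_eq_chain]
  unfold pvChain
  cases h1 : pvPass1 (pvNorm control_id) _ with
  | some n => rfl
  | none =>
    cases h2 : pvPass2 (pvNorm control_id) _ with
    | some n => rfl
    | none =>
      cases h3 : pvPass3 (pvNorm control_id) _ _ <;> rfl
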